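-- pv_equiv track=rewrite | github.com/GoshaZo/HandicapChair | final.py | back_ground
-- ===== SOURCE A (Python) =====
-- def back_ground(val):
--     color = ["#FF0000", "#FF5000", "#FF7500", "#FFA000", "#FFC500", "#FFEA00", "#FFF100", "#CBFF00", "#71FF00",
--              "#00FF00"]
--     try:
--         for index in range(10):
--             if int(val) < 200 * (index + 1):
--                 return color[-(index + 1)]
--         return color[0]
--     except:
--         return "#808080"
-- ===== SOURCE B (Python) =====
-- def back_ground(val):
--     color = ["#FF0000", "#FF5000", "#FF7500", "#FFA000", "#FFC500", "#FFEA00", "#FFF100", "#CBFF00", "#71FF00",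
--              "#00FF00"]
--     try:
--         b = max(0, min(int(val) // 200, 9))
--         return color[-(b + 1)]
--     except:
--         return "#808080"
-- ===== Notes on version B (the rewrite author's own statement) =====
-- stated objective: simpler
-- what changed: Replaces the linear scan over the ten thresholds with a direct clamped bucket index computed by one floor division and a single indexed lookup.
import Mathlib
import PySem

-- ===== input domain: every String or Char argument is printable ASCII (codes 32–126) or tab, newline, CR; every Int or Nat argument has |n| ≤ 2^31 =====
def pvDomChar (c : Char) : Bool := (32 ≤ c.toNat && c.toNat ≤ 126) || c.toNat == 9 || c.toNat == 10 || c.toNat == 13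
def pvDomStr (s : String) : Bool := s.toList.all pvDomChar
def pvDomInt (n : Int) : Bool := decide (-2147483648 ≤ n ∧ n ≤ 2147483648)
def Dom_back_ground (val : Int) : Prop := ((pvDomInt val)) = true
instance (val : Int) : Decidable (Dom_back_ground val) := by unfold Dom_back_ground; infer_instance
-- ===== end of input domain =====

-- B replaces the 10-step threshold scan with a direct clamped bucket index; objective: simpler.
-- ===== PORT A =====
def pvColors : List String :=
  ["#FF0000", "#FF5000", "#FF7500", "#FFA000", "#FFC500", "#FFEA00", "#FFF100", "#CBFF00", "#71FF00",
   "#00FF00"]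

-- the 'for index in range(10)' loop with its early return; [] = loop fell through → color[0]
def pvBgLoop (val : Int) (color : List String) : List Int → String
  | [] => (PySem.List.pyGet? color 0).getD ""
  | i :: rest =>
      if val < 200 * (i + 1) then (PySem.List.pyGet? color (-(i + 1))).getD ""
      else pvBgLoop val color rest

def back_ground (val : Int) : String :=
  pvBgLoop val pvColors (PySem.List.pyRange 0 10 1)

-- ===== PORT B =====
def back_ground_alt (val : Int) : String :=
  let b : Int := max 0 (min (PySem.Int.floordiv val 200) 9)
  (PySem.List.pyGet? pvColors (-(b + 1))).getD ""

-- ===== PRECONDITION & SPEC =====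
def Spec_back_ground (val : Int) (out : String) : Prop := out = back_ground_alt val
instance (val : Int) (out : String) : Decidable (Spec_back_ground val out) := by unfold Spec_back_ground; infer_instance

-- ===== CLAIM (what is proved, stated in full; the proofs are below) =====
def Claim_equal_back_ground : Prop := ∀ (val : Int), Dom_back_ground val → Spec_back_ground val (back_ground val)

-- ===== LEMMAS AND PROOFS =====

theorem pvBucket_eq (val : Int) (k : Int) (hk0 : 0 ≤ k) (hk9 : k ≤ 9)
    (hlo : 200 * k ≤ val) (hhi : val < 200 * (k + 1)) :
    max 0 (min (PySem.Int.floordiv val 200) 9) = k := by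
  have : PySem.Int.floordiv val 200 = k :=
    (PySem.Int.floordiv_eq_iff_of_pos (by omega)).mpr ⟨by omega, by omega⟩
  rw [this]; omega

theorem pvBucket_neg (val : Int) (h : val < 0) :
    max 0 (min (PySem.Int.floordiv val 200) 9) = 0 := by
  have : PySem.Int.floordiv val 200 < 0 :=
    (PySem.Int.floordiv_lt_iff_lt_mul (by omega)).mpr (by omega)
  omega

theorem pvBucket_big (val : Int) (h : 2000 ≤ val) :
    max 0 (min (PySem.Int.floordiv val 200) 9) = 9 := by
  have : 9 ≤ PySem.Int.floordiv val 200 :=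
    (PySem.Int.le_floordiv_iff_mul_le (by omega)).mpr (by omega)
  omega

-- ===== VERDICT (by name: the statement is the Claim_ definition above) =====
theorem back_ground_spec : Claim_equal_back_ground := by
  intro val _
  show back_ground val = back_ground_alt val
  unfold back_ground back_ground_alt
  have hr : PySem.List.pyRange 0 10 1 = [0,1,2,3,4,5,6,7,8,9] := by decide
  rw [hr]
  by_cases h0 : val < 200
  · rcases lt_or_ge val 0 with hneg | hpos
    · rw [pvBucket_neg val hneg]; simp [pvBgLoop, h0]
    · rw [pvBucket_eq val 0 (by omega) (by omega) (by omega) (by omega)]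
      simp [pvBgLoop, h0]
  · by_cases h1 : val < 400
    · rw [pvBucket_eq val 1 (by omega) (by omega) (by omega) (by omega)]
      simp [pvBgLoop, h0, h1]
    by_cases h2 : val < 600
    · rw [pvBucket_eq val 2 (by omega) (by omega) (by omega) (by omega)]
      simp [pvBgLoop, h0, h1, h2]
    by_cases h3 : val < 800
    · rw [pvBucket_eq val 3 (by omega) (by omega) (by omega) (by omega)]
      simp [pvBgLoop, h0, h1, h2, h3]
    by_cases h4 : val < 1000
    · rw [pvBucket_eq val 4 (by omega) (by omega) (by omega) (by omega)]
      simp [pvBgLoop, h0, h1, h2, h3, h4]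
    by_cases h5 : val < 1200
    · rw [pvBucket_eq val 5 (by omega) (by omega) (by omega) (by omega)]
      simp [pvBgLoop, h0, h1, h2, h3, h4, h5]
    by_cases h6 : val < 1400
    · rw [pvBucket_eq val 6 (by omega) (by omega) (by omega) (by omega)]
      simp [pvBgLoop, h0, h1, h2, h3, h4, h5, h6]
    by_cases h7 : val < 1600
    · rw [pvBucket_eq val 7 (by omega) (by omega) (by omega) (by omega)]
      simp [pvBgLoop, h0, h1, h2, h3, h4, h5, h6, h7]
    by_cases h8 : val < 1800
    · rw [pvBucket_eq val 8 (by omega) (by omega) (by omega) (by omega)]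
      simp [pvBgLoop, h0, h1, h2, h3, h4, h5, h6, h7, h8]
    by_cases h9 : val < 2000
    · rw [pvBucket_eq val 9 (by omega) (by omega) (by omega) (by omega)]
      simp [pvBgLoop, h0, h1, h2, h3, h4, h5, h6, h7, h8, h9]
    · rw [pvBucket_big val (by omega)]
      simp [pvBgLoop, h0, h1, h2, h3, h4, h5, h6, h7, h8, h9]
      decide
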